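-- pv_equiv track=rewrite | github.com/AlessandroCaula/ProgrammingAlgoAndChallenges | Various/renaming_files_test/not_yelling.py | noYelling
-- ===== SOURCE A (Python) =====
-- def noYelling(sentence: str) -> str:
--     # Retrieve the last punctuation
--     last_punct = sentence[len(sentence) - 1]
--     count = 0
--     # loop the string from the end of the sentence
--     for i in range(len(sentence) - 1, -1, -1):
--         # count the number of last_punct from the end of the sentence
--         if sentence[i] == last_punct:
--             count += 1
--         else:
--             break
--     # remove the last punctuations, leaving only one
--     final_sentence = sentence[:len(sentence) - count + 1]
--     return final_sentence
-- ===== SOURCE B (Python) =====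
-- def noYelling(sentence: str) -> str:
--     # forward single pass: buffer consecutive occurrences of the last character;
--     # flush the buffer only when a different character follows, so the trailing
--     # run is never emitted; append one closing character at the end.
--     last = sentence[-1]
--     out = []
--     pending = 0
--     for ch in sentence:
--         if ch == last:
--             pending += 1
--         else:
--             out.append(last * pending)
--             pending = 0
--             out.append(ch)
--     out.append(last)
--     return ''.join(out)
-- ===== Notes on version B (the rewrite author's own statement) =====
-- stated objective: alternative
-- what changed: Replaces A's backward scan that counts the trailing run and slices by index with a single forward pass that buffers runs of the last character, flushing a buffered run only when a different character follows, then appends one closing character.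
import Mathlib
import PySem

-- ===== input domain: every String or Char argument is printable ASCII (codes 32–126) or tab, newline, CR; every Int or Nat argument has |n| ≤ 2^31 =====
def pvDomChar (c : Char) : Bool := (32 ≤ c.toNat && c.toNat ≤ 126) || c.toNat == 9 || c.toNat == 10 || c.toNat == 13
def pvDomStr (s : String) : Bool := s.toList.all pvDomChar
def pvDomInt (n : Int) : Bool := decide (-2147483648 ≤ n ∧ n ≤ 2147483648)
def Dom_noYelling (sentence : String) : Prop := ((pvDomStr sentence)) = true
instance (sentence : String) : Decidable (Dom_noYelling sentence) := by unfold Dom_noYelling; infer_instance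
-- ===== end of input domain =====

-- B replaces A's backward scan (count the trailing run, then slice by index) with one forward
-- pass buffering runs of the last character, flushed only when a different character follows
-- (alternative decomposition; same cost).


-- ===== PORT A =====
-- the 'for i in range(len(sentence)-1, -1, -1): … else: break' loop, carrying 'count'
def noYellingLoop (cs : List Char) (lastPunct : Char) : List Int → Int → Int
  | [], count => count
  | i :: rest, count =>
    if PySem.List.pyGetD cs i ' ' == lastPunct then noYellingLoop cs lastPunct rest (count + 1)
    else count

def noYelling (sentence : String) : String :=
  let cs := sentence.toList
  let n : Int := (cs.length : Int)
  -- sentence[len(sentence)-1]; in range exactly when Pre_ holds (nonempty)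
  let lastPunct := PySem.List.pyGetD cs (n - 1) ' '
  let count := noYellingLoop cs lastPunct (PySem.List.pyRange (n - 1) (-1) (-1)) 0
  String.ofList (PySem.List.slice cs none (some (n - count + 1)))

-- ===== PORT B =====
-- forward pass: state = (out so far, pending = length of the current buffered run of 'last')
def noYelling_alt (sentence : String) : String :=
  match PySem.Str.pyGet? sentence (-1) with
  | none => ""   -- sentence[-1] raises IndexError in Python here (outside Pre_)
  | some last =>
    let st := sentence.toList.foldl
      (fun (st : List Char × Nat) ch =>
        if ch == last then (st.1, st.2 + 1)
        else (st.1 ++ List.replicate st.2 last ++ [ch], 0))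
      ([], 0)
    String.ofList (st.1 ++ [last])

-- ===== PRECONDITION & SPEC =====
-- Pre_ excludes only the empty string, where A raises IndexError on sentence[len(sentence)-1]
def Pre_noYelling (sentence : String) : Prop := sentence.toList ≠ []
instance (sentence : String) : Decidable (Pre_noYelling sentence) := by unfold Pre_noYelling; infer_instance
def pvWitness_noYelling : String := "Hi!!!"

def Spec_noYelling (sentence : String) (out : String) : Prop := out = noYelling_alt sentence
instance (sentence : String) (out : String) : Decidable (Spec_noYelling sentence out) := by unfold Spec_noYelling; infer_instance

-- ===== CLAIM =====
def Claim_equal_noYelling : Prop := ∀ (sentence : String), Dom_noYelling sentence → Pre_noYelling sentence → Spec_noYelling sentence (noYelling sentence)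

-- ===== LEMMAS AND PROOFS =====

-- A's loop counts the length of the trailing run of lastPunct
lemma noYellingLoop_count (cs : List Char) (lp : Char) (j : Nat) (hj : j ≤ cs.length)
    (count : Int) :
    noYellingLoop cs lp (PySem.List.pyRange ((j : Int) - 1) (-1) (-1)) count
      = count + (((cs.take j).reverse.takeWhile (· == lp)).length : Int) := by
  induction j generalizing count with
  | zero => simp [PySem.List.pyRange_neg_one_eq_nil, noYellingLoop]
  | succ j ih =>
    rw [show (((j + 1 : Nat) : Int) - 1) = (j : Int) by push_cast; ring,
        PySem.List.pyRange_neg_one_cons (by omega)]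
    have hjl : j < cs.length := by omega
    have htake : (cs.take (j + 1)).reverse = cs[j] :: (cs.take j).reverse := by
      rw [List.take_add_one]
      simp [List.getElem?_eq_getElem hjl]
    rw [noYellingLoop]
    rw [PySem.List.pyGetD_natCast, List.getD_eq_getElem _ _ hjl]
    by_cases h : cs[j] = lp
    · simp only [h, BEq.rfl, if_true]
      rw [ih (by omega)]
      rw [htake, List.takeWhile_cons]
      simp [h]
      ring
    · have : (cs[j] == lp) = false := by simp [h]
      simp only [this]
      rw [htake, List.takeWhile_cons]
      simp [h]

-- the trailing run is a block of replicated characters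
lemma takeWhile_eq_replicate (r : List Char) (c : Char) :
    r.takeWhile (· == c) = List.replicate (r.takeWhile (· == c)).length c := by
  apply List.eq_replicate_of_mem
  intro b hb
  have := List.mem_takeWhile_imp hb
  simpa using this

-- B's forward fold: out = the prefix with its trailing run of 'last' removed,
-- pending = the length of that trailing run
lemma noYellingAlt_fold (last : Char) (p : List Char) :
    p.foldl
      (fun (st : List Char × Nat) ch =>
        if ch == last then (st.1, st.2 + 1)
        else (st.1 ++ List.replicate st.2 last ++ [ch], 0))
      ([], 0)
      = ((p.reverse.dropWhile (· == last)).reverse, (p.reverse.takeWhile (· == last)).length) := by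
  induction p using List.reverseRecOn with
  | nil => simp
  | append_singleton p ch ih =>
    rw [List.foldl_append, ih, List.foldl_cons, List.foldl_nil]
    by_cases h : ch = last
    · simp [h, List.takeWhile_cons, List.dropWhile_cons]
    · have hb : (ch == last) = false := by simp [h]
      simp only [hb, Bool.false_eq_true, if_false, List.reverse_append, List.reverse_singleton,
        List.singleton_append, List.dropWhile_cons, List.takeWhile_cons, Prod.mk.injEq]
      refine ⟨?_, ?_⟩
      · have hsplit : p.reverse = p.reverse.takeWhile (· == last) ++ p.reverse.dropWhile (· == last) :=
          (List.takeWhile_append_dropWhile).symm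
        have hrep := takeWhile_eq_replicate p.reverse last
        simp only [List.reverse_cons]
        congr 1
        conv_rhs => rw [← List.reverse_reverse p, hsplit]
        rw [hrep]
        simp [List.reverse_replicate]
      · simp
  
-- core list fact: taking up to one past the start of the trailing run = dropping the run and re-appending
lemma take_run (t : List Char) (c : Char) :
    (c :: t).reverse.take ((c :: t).length - ((c :: t).takeWhile (· == c)).length + 1)
      = ((c :: t).dropWhile (· == c)).reverse ++ [c] := by
  set r := c :: t with hr
  have hK1 : 1 ≤ (r.takeWhile (· == c)).length := by
    rw [hr, List.takeWhile_cons]; simp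
  have hKlen : (r.takeWhile (· == c)).length ≤ r.length := (List.takeWhile_prefix _).length_le
  set K := (r.takeWhile (· == c)).length with hK
  have hm : r.length - K + 1 ≤ r.length := by omega
  rw [List.take_reverse]
  have hsplit : r = List.replicate K c ++ r.dropWhile (· == c) := by
    conv_lhs => rw [← List.takeWhile_append_dropWhile (p := (· == c)) (l := r)]
    rw [← takeWhile_eq_replicate]
  have hidx : r.length - (r.length - K + 1) = K - 1 := by omega
  rw [hidx]
  conv_lhs => rw [hsplit]
  rw [List.drop_append_of_le_length (by simp), List.drop_replicate]
  have h1 : K - (K - 1) = 1 := by omega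
  rw [h1]
  simp

-- ===== VERDICT =====
theorem noYelling_spec : Claim_equal_noYelling := by
  intro s _ hpre
  unfold Spec_noYelling noYelling noYelling_alt
  have hne : s.toList ≠ [] := hpre
  obtain ⟨c, t, hrl⟩ : ∃ c t, s.toList.reverse = c :: t := by
    cases h : s.toList.reverse with
    | nil => exact absurd (by simpa using h) hne
    | cons c t => exact ⟨c, t, rfl⟩
  have hL : s.toList = t.reverse ++ [c] := by
    rw [← List.reverse_reverse s.toList, hrl, List.reverse_cons]
  have hget : PySem.Str.pyGet? s (-1) = some c := by
    simp [PySem.List.pyGet?_neg_one, hL]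
  rw [hget]
  simp only [noYellingAlt_fold]
  simp only [hL]
  have hlast : PySem.List.pyGetD (t.reverse ++ [c]) (((t.reverse ++ [c]).length : Int) - 1) ' ' = c := by
    rw [show (((t.reverse ++ [c]).length : Int) - 1) = ((t.length : Nat) : Int) by simp]
    rw [PySem.List.pyGetD_natCast]
    simp
  rw [hlast]
  have hloop := noYellingLoop_count (t.reverse ++ [c]) c (t.reverse ++ [c]).length
    (le_refl _) 0
  rw [List.take_length] at hloop
  simp only [List.reverse_append, List.reverse_reverse, List.reverse_cons,
    List.reverse_nil, List.nil_append, List.singleton_append] at hloop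
  rw [hloop]
  congr 1
  · have hK1 : 1 ≤ (((c :: t).takeWhile (· == c)).length) := by
      rw [List.takeWhile_cons]; simp
    have hKle : (((c :: t).takeWhile (· == c)).length) ≤ t.length + 1 := by
      have := (List.takeWhile_prefix (l := c :: t) (p := (· == c))).length_le
      simpa using this
    rw [show (((t.reverse ++ [c]).length : Int) - (0 + (((c :: t).takeWhile (· == c)).length : Int)) + 1)
        = ((t.length + 1 - ((c :: t).takeWhile (· == c)).length + 1 : Nat) : Int) by
      simp only [List.length_append, List.length_reverse, List.length_singleton]
      push_cast [Nat.sub_add_cancel]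
      omega]
    rw [PySem.List.slice_to_natCast]
    have h2 := take_run t c
    simp only [List.reverse_cons, List.length_cons] at h2
    simp only [List.reverse_append, List.reverse_reverse, List.reverse_singleton,
      List.singleton_append]
    exact h2
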